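-- pv_equiv track=rewrite | github.com/alltheplaces/alltheplaces | locations/spiders/cell-only.py | normalize_dayrange
-- ===== SOURCE A (Python) =====
-- def normalize_dayrange(dayrange):
--     replacements = [
--         ["MON", "Mo"],
--         ["TUE", "Tu"],
--         ["WED", "We"],
--         ["THU", "Th"],
--         ["FRI", "Fr"],
--         ["SAT", "Sa"],
--         ["SUN", "Su"],
--     ]
--     for r in replacements:
--         dayrange = dayrange.replace(r[0], r[1])
--     return dayrange
-- ===== SOURCE B (Python) =====
-- def normalize_dayrange(dayrange):
--     day_map = {
--         "MON": "Mo",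
--         "TUE": "Tu",
--         "WED": "We",
--         "THU": "Th",
--         "FRI": "Fr",
--         "SAT": "Sa",
--         "SUN": "Su",
--     }
--     out = []
--     i = 0
--     n = len(dayrange)
--     while i < n:
--         rep = day_map.get(dayrange[i : i + 3])
--         if rep is not None:
--             out.append(rep)
--             i += 3
--         else:
--             out.append(dayrange[i])
--             i += 1
--     return "".join(out)
-- ===== Notes on version B (the rewrite author's own statement) =====
-- stated objective: alternative
-- what changed: Seven sequential full-string str.replace passes are replaced by a single left-to-right table-driven scan that looks the 3-character window up in a dict and emits either the mapped abbreviation or the character.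
-- intended difference: On strings containing 'SATUE' or 'SATHU', A's sequential replaces cascade (replacing TUE/THU first creates a fresh 'SAT' that the later SAT pass also rewrites, e.g. A('SATUE')='Sau'), while B does the intended single leftmost-match substitution (B('SATUE')='SaUE'). — e.g. on normalize_dayrange("SATUE"): A returns "Sau", B returns "SaUE"
import Mathlib
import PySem

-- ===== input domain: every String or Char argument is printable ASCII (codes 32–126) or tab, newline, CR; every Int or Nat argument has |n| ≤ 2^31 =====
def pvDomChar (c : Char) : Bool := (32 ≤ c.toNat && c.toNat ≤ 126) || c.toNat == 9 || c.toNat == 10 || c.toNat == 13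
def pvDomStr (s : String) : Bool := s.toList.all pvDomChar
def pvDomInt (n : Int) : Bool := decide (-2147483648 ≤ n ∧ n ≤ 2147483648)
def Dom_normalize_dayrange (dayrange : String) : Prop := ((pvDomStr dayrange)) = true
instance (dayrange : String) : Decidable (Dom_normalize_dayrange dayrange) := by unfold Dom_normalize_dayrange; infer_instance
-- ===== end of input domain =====

-- B replaces A's seven sequential str.replace passes by one table-driven left-to-right scan;
-- on the exceptional inputs containing "SATUE"/"SATHU" A's passes cascade and B intentionally differs (see D_ below).

-- ===== PORT A =====
def normalize_dayrange (dayrange : String) : String :=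
  let replacements : List (String × String) :=
    [("MON", "Mo"), ("TUE", "Tu"), ("WED", "We"), ("THU", "Th"),
     ("FRI", "Fr"), ("SAT", "Sa"), ("SUN", "Su")]
  replacements.foldl (fun s r => PySem.Str.replace s r.1 r.2) dayrange

-- ===== PORT B =====
def pvDayMap : List (String × String) :=
  [("MON", "Mo"), ("TUE", "Tu"), ("WED", "We"), ("THU", "Th"),
   ("FRI", "Fr"), ("SAT", "Sa"), ("SUN", "Su")]

-- the while loop of Source B: look the 3-char window up in the map; emit the mapped form
-- (advance 3) or the current character (advance 1)
def pvAltGo (l : List Char) : List Char :=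
  match l with
  | [] => []
  | c :: t =>
    match List.lookup (String.ofList (List.take 3 (c :: t))) pvDayMap with
    | some r => r.toList ++ pvAltGo (t.drop 2)
    | none => c :: pvAltGo t
termination_by l.length
decreasing_by
  · simp only [List.length_drop, List.length_cons]; omega
  · simp only [List.length_cons]; omega

def normalize_dayrange_alt (dayrange : String) : String :=
  String.ofList (pvAltGo dayrange.toList)

-- ===== PRECONDITION & SPEC =====
-- On strings containing "SATUE" or "SATHU", A's sequential replaces cascade (replacing TUE/THU
-- first creates a fresh "SAT" that the later SAT pass also rewrites, e.g. A "SATUE" = "Sau");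
-- B does the intended single leftmost-match substitution (B "SATUE" = "SaUE").
def D_normalize_dayrange (dayrange : String) : Prop :=
  PySem.Str.isIn "SATUE" dayrange = true ∨ PySem.Str.isIn "SATHU" dayrange = true
instance (dayrange : String) : Decidable (D_normalize_dayrange dayrange) := by
  unfold D_normalize_dayrange; infer_instance

def Spec_normalize_dayrange (dayrange : String) (out : String) : Prop :=
  ¬ D_normalize_dayrange dayrange → out = normalize_dayrange_alt dayrange
instance (dayrange : String) (out : String) : Decidable (Spec_normalize_dayrange dayrange out) := by
  unfold Spec_normalize_dayrange; infer_instance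

def pvDiffWitness_normalize_dayrange : String := "SATUE"
def pvDiffWitnessOut_normalize_dayrange : String × String := ("Sau", "SaUE")

-- ===== CLAIM (what is proved, stated in full; the proofs are below) =====
def Claim_unchanged_normalize_dayrange : Prop :=
  ∀ (dayrange : String), Dom_normalize_dayrange dayrange →
    Spec_normalize_dayrange dayrange (normalize_dayrange dayrange)
def Claim_changed_normalize_dayrange : Prop :=
  Dom_normalize_dayrange (pvDiffWitness_normalize_dayrange) ∧
  D_normalize_dayrange (pvDiffWitness_normalize_dayrange) ∧
  normalize_dayrange (pvDiffWitness_normalize_dayrange) = pvDiffWitnessOut_normalize_dayrange.1 ∧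
  normalize_dayrange_alt (pvDiffWitness_normalize_dayrange) = pvDiffWitnessOut_normalize_dayrange.2 ∧
  pvDiffWitnessOut_normalize_dayrange.1 ≠ pvDiffWitnessOut_normalize_dayrange.2
def Claim_exact_normalize_dayrange : Prop :=
  ∀ (dayrange : String), Dom_normalize_dayrange dayrange → D_normalize_dayrange dayrange →
    normalize_dayrange dayrange ≠ normalize_dayrange_alt dayrange

-- ===== LEMMAS AND PROOFS =====

-- A multi-rule scanner: at each position apply the first rule whose pattern is a prefix
-- (emit the replacement, skip the pattern), else copy the character.  The seven replace
-- passes of A compose into one such scanner with rule set pvR7 below.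
def findRule : List (List Char × List Char) → List Char → Option (List Char × List Char)
  | [], _ => none
  | r :: rs, l => if r.1.isPrefixOf l then some r else findRule rs l

def mscan (R : List (List Char × List Char)) : List Char → List Char
  | [] => []
  | c :: t =>
    match findRule R (c :: t) with
    | some r => r.2 ++ mscan R (t.drop (r.1.length - 1))
    | none => c :: mscan R t
termination_by l => l.length
decreasing_by
  · simp only [List.length_drop, List.length_cons]; omega
  · simp only [List.length_cons]; omega

def pvMON : List Char × List Char := (['M','O','N'], ['M','o'])
def pvTUE : List Char × List Char := (['T','U','E'], ['T','u'])
def pvWED : List Char × List Char := (['W','E','D'], ['W','e'])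
def pvTHU : List Char × List Char := (['T','H','U'], ['T','h'])
def pvFRI : List Char × List Char := (['F','R','I'], ['F','r'])
def pvSAT : List Char × List Char := (['S','A','T'], ['S','a'])
def pvSUN : List Char × List Char := (['S','U','N'], ['S','u'])
def pvSATUE : List Char × List Char := (['S','A','T','U','E'], ['S','a','u'])
def pvSATHU : List Char × List Char := (['S','A','T','H','U'], ['S','a','h'])

def pvR1 : List (List Char × List Char) := [pvMON]
def pvR2 : List (List Char × List Char) := pvR1 ++ [pvTUE]
def pvR3 : List (List Char × List Char) := pvR2 ++ [pvWED]
def pvR4 : List (List Char × List Char) := pvR3 ++ [pvTHU]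
def pvR5 : List (List Char × List Char) := pvR4 ++ [pvFRI]
def pvR6 : List (List Char × List Char) := pvR5 ++ [pvSATUE, pvSATHU, pvSAT]
def pvR7 : List (List Char × List Char) := pvR6 ++ [pvSUN]

theorem mscan_nil (R : List (List Char × List Char)) : mscan R [] = [] := by rw [mscan]

theorem mscan_cons_some {R : List (List Char × List Char)} {c : Char} {t : List Char}
    {r : List Char × List Char} (h : findRule R (c :: t) = some r) :
    mscan R (c :: t) = r.2 ++ mscan R (t.drop (r.1.length - 1)) := by
  rw [mscan, h]

theorem mscan_cons_none {R : List (List Char × List Char)} {c : Char} {t : List Char}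
    (h : findRule R (c :: t) = none) :
    mscan R (c :: t) = c :: mscan R t := by
  rw [mscan, h]

theorem push2 (R : List (List Char × List Char)) (a b : Char) (m : List Char)
    (h1 : findRule R (a :: b :: m) = none) (h2 : findRule R (b :: m) = none) :
    mscan R (a :: b :: m) = a :: b :: mscan R m := by
  rw [mscan_cons_none h1, mscan_cons_none h2]

theorem push3 (R : List (List Char × List Char)) (a b c : Char) (m : List Char)
    (h1 : findRule R (a :: b :: c :: m) = none) (h2 : findRule R (b :: c :: m) = none)
    (h3 : findRule R (c :: m) = none) :
    mscan R (a :: b :: c :: m) = a :: b :: c :: mscan R m := by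
  rw [mscan_cons_none h1, mscan_cons_none h2, mscan_cons_none h3]

theorem findRule_mem {R : List (List Char × List Char)} {l : List Char}
    {r : List Char × List Char} (h : findRule R l = some r) :
    r ∈ R ∧ r.1 <+: l := by
  induction R with
  | nil => simp [findRule] at h
  | cons a rs ih =>
    rw [findRule] at h
    split at h
    · cases h
      exact ⟨List.mem_cons_self, (List.isPrefixOf_iff_prefix).1 (by assumption)⟩
    · obtain ⟨hm, hp⟩ := ih h
      exact ⟨List.mem_cons_of_mem _ hm, hp⟩

theorem findRule_none_of {R : List (List Char × List Char)} {l : List Char}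
    (h : findRule R l = none) {r : List Char × List Char} (hm : r ∈ R) :
    ¬ r.1 <+: l := by
  induction R with
  | nil => simp at hm
  | cons a rs ih =>
    rw [findRule] at h
    split at h
    · cases h
    · rcases List.mem_cons.1 hm with rfl | hm'
      · intro hp
        rw [(List.isPrefixOf_iff_prefix).2 hp] at *
        simp_all
      · exact ih h hm'

theorem findRule_append (R S : List (List Char × List Char)) (l : List Char) :
    findRule (R ++ S) l =
      (match findRule R l with
       | some r => some r
       | none => findRule S l) := by
  induction R with
  | nil => simp [findRule]
  | cons a rs ih =>
    rw [List.cons_append, findRule, findRule]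
    split <;> simp [ih]

-- if [Y,Z] is a prefix of the scanner's output then either it was a prefix of the input,
-- or the Z is the head of a replacement: a rule with pattern head Z matched right after the Y
theorem pair_prefix {R : List (List Char × List Char)} {Y Z : Char}
    (hR : ∀ r ∈ R, r.1 ≠ [] ∧ r.2 ≠ [] ∧ r.1.head? = r.2.head? ∧ r.1.head? ≠ some Y)
    {t : List Char} (h : [Y, Z] <+: mscan R t) :
    [Y, Z] <+: t ∨ ∃ r ∈ R, r.1.head? = some Z ∧ (Y :: r.1) <+: t := by
  cases t with
  | nil => rw [mscan_nil] at h; simp at h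
  | cons c t2 =>
    rcases hfr : findRule R (c :: t2) with _ | r
    · rw [mscan_cons_none hfr] at h
      obtain ⟨hYc, hZ⟩ := List.cons_prefix_cons.1 h
      subst hYc
      cases t2 with
      | nil =>
        rw [mscan_nil] at hZ; simp at hZ
      | cons d t3 =>
        rcases hfr2 : findRule R (d :: t3) with _ | r2
        · rw [mscan_cons_none hfr2] at hZ
          obtain ⟨hZd, _⟩ := List.cons_prefix_cons.1 hZ
          subst hZd
          exact Or.inl (List.cons_prefix_cons.2 ⟨rfl, List.cons_prefix_cons.2 ⟨rfl, List.nil_prefix⟩⟩)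
        · rw [mscan_cons_some hfr2] at hZ
          obtain ⟨hm, hp⟩ := findRule_mem hfr2
          obtain ⟨h1ne, h2ne, hhd, _⟩ := hR r2 hm
          obtain ⟨a, as, ha⟩ : ∃ a as, r2.1 = a :: as := by
            cases hx : r2.1 with
            | nil => exact absurd hx h1ne
            | cons a as => exact ⟨a, as, rfl⟩
          obtain ⟨b, bs, hb⟩ : ∃ b bs, r2.2 = b :: bs := by
            cases hx : r2.2 with
            | nil => exact absurd hx h2ne
            | cons b bs => exact ⟨b, bs, rfl⟩
          have had : a = d := by
            rw [ha] at hp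
            exact (List.cons_prefix_cons.1 hp).1
          have hba : b = a := by
            rw [ha, hb] at hhd
            simp at hhd
            exact hhd.symm
          rw [hb, List.cons_append] at hZ
          obtain ⟨hZb, _⟩ := List.cons_prefix_cons.1 hZ
          subst hZb
          refine Or.inr ⟨r2, hm, ?_, ?_⟩
          · rw [ha]; simp [hba, had]
          · exact List.cons_prefix_cons.2 ⟨rfl, hp⟩
    · rw [mscan_cons_some hfr] at h
      obtain ⟨hm, hp⟩ := findRule_mem hfr
      obtain ⟨h1ne, h2ne, hhd, hnY⟩ := hR r hm
      obtain ⟨a, as, ha⟩ : ∃ a as, r.1 = a :: as := by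
        cases hx : r.1 with
        | nil => exact absurd hx h1ne
        | cons a as => exact ⟨a, as, rfl⟩
      obtain ⟨b, bs, hb⟩ : ∃ b bs, r.2 = b :: bs := by
        cases hx : r.2 with
        | nil => exact absurd hx h2ne
        | cons b bs => exact ⟨b, bs, rfl⟩
      have hac : a = c := by
        rw [ha] at hp
        exact (List.cons_prefix_cons.1 hp).1
      have hba : b = a := by
        rw [ha, hb] at hhd
        simp at hhd
        exact hhd.symm
      rw [hb, List.cons_append] at h
      obtain ⟨hYb, _⟩ := List.cons_prefix_cons.1 h
      refine absurd ?_ hnY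
      rw [ha]
      simp only [List.head?_cons]
      exact congrArg some ((hYb.trans hba).symm)

theorem step_generic (R : List (List Char × List Char)) (X Y Z : Char) (q : List Char)
    (hR : ∀ r ∈ R, r.1 ≠ [] ∧ r.2 ≠ [] ∧ r.1.head? = r.2.head? ∧
          r.1.head? ≠ some Y ∧ r.1.head? ≠ some Z)
    (hpush : ∀ r ∈ R, ∀ m, mscan [([X,Y,Z], q)] (r.2 ++ m) = r.2 ++ mscan [([X,Y,Z], q)] m)
    (hnew : ∀ m, mscan R (X :: Y :: Z :: m) = X :: Y :: Z :: mscan R m) :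
    ∀ l, mscan [([X,Y,Z], q)] (mscan R l) = mscan (R ++ [([X,Y,Z], q)]) l := by
  suffices h : ∀ (n : Nat) (l : List Char), l.length ≤ n →
      mscan [([X,Y,Z], q)] (mscan R l) = mscan (R ++ [([X,Y,Z], q)]) l from
    fun l => h l.length l le_rfl
  intro n
  induction n with
  | zero =>
    intro l hl
    have hnil : l = [] := List.eq_nil_of_length_eq_zero (Nat.le_zero.1 hl)
    subst hnil
    simp [mscan_nil]
  | succ n ih =>
    intro l hl
    cases l with
    | nil => simp [mscan_nil]
    | cons c t =>
      rcases hfr : findRule (R ++ [([X,Y,Z], q)]) (c :: t) with _ | r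
      · -- no rule matches at the head
        have hfrR : findRule R (c :: t) = none := by
          rcases hfr2 : findRule R (c :: t) with _ | r2
          · rfl
          · rw [findRule_append, hfr2] at hfr; cases hfr
        have hfrT : findRule [([X,Y,Z], q)] (c :: t) = none := by
          rw [findRule_append, hfrR] at hfr; exact hfr
        have htok : ¬ ([X,Y,Z] <+: (c :: t)) := by
          intro hp
          rw [findRule, (List.isPrefixOf_iff_prefix).2 hp] at hfrT
          simp at hfrT
        have hnotop : ¬ ([X,Y,Z] <+: c :: mscan R t) := by
          intro hp
          obtain ⟨hXc, hp2⟩ := List.cons_prefix_cons.1 hp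
          rcases pair_prefix (fun r hm => ⟨(hR r hm).1, (hR r hm).2.1, (hR r hm).2.2.1,
              (hR r hm).2.2.2.1⟩) hp2 with hL | ⟨r, hm, hhead, _⟩
          · exact htok (List.cons_prefix_cons.2 ⟨hXc, hL⟩)
          · exact (hR r hm).2.2.2.2 hhead
        have hnone2 : findRule [([X,Y,Z], q)] (c :: mscan R t) = none := by
          rw [findRule]
          rw [if_neg]
          · rfl
          · intro hb
            exact hnotop ((List.isPrefixOf_iff_prefix).1 hb)
        rw [mscan_cons_none hfrR, mscan_cons_none hnone2,
            ih t (by simp at hl; omega), mscan_cons_none hfr]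
      · rcases hfr2 : findRule R (c :: t) with _ | r2
        · -- the new rule [X,Y,Z] matched
          have hT : findRule [([X,Y,Z], q)] (c :: t) = some r := by
            rw [findRule_append, hfr2] at hfr; exact hfr
          obtain ⟨hm, hp⟩ := findRule_mem hT
          simp at hm
          subst hm
          obtain ⟨rest, hrest0⟩ := hp
          have hrest : X :: Y :: Z :: rest = c :: t := hrest0
          injection hrest with hXc hrest
          subst hXc; subst hrest
          rw [hnew rest]
          have hm1 : findRule [([X,Y,Z], q)] (X :: Y :: Z :: mscan R rest) = some ([X,Y,Z], q) := by
            rw [findRule, if_pos]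
            exact (List.isPrefixOf_iff_prefix).2 ⟨_, rfl⟩
          rw [mscan_cons_some hm1]
          simp only [List.length_cons, List.length_nil, List.drop_succ_cons, List.drop_zero]
          rw [ih rest (by simp at hl; omega)]
          rw [mscan_cons_some hfr]
          simp
        · have he : r2 = r := by
            have hfr' := hfr
            rw [findRule_append, hfr2] at hfr'
            injection hfr'
          obtain ⟨hm, _⟩ := findRule_mem hfr2
          rw [mscan_cons_some hfr2, hpush r2 hm,
              ih (t.drop (r2.1.length - 1)) (by simp at hl ⊢; omega),
              mscan_cons_some hfr, ← he]

theorem step6 : ∀ l, mscan [pvSAT] (mscan pvR5 l) = mscan pvR6 l := by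
  have hp5 : ∀ r ∈ pvR5, ∀ m, mscan [pvSAT] (r.2 ++ m) = r.2 ++ mscan [pvSAT] m := by
    intro r hr m
    simp only [pvR5, pvR4, pvR3, pvR2, pvR1, List.mem_append, List.mem_singleton,
      List.mem_cons, List.not_mem_nil, or_false, or_assoc] at hr
    rcases hr with rfl | rfl | rfl | rfl | rfl <;>
      exact push2 _ _ _ _ (by simp [findRule, pvSAT, pvMON, pvTUE, pvWED, pvTHU, pvFRI, List.isPrefixOf])
        (by simp [findRule, pvSAT, pvMON, pvTUE, pvWED, pvTHU, pvFRI, List.isPrefixOf])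
  suffices h : ∀ (n : Nat) (l : List Char), l.length ≤ n →
      mscan [pvSAT] (mscan pvR5 l) = mscan pvR6 l from fun l => h l.length l le_rfl
  intro n
  induction n with
  | zero =>
    intro l hl
    have hnil : l = [] := List.eq_nil_of_length_eq_zero (Nat.le_zero.1 hl)
    subst hnil
    simp [mscan_nil]
  | succ n ih =>
    intro l hl
    cases l with
    | nil => simp [mscan_nil]
    | cons c t =>
      rcases hfr : findRule pvR6 (c :: t) with _ | r
      · -- no pvR6 rule matches at the head
        have hfrR : findRule pvR5 (c :: t) = none := by
          rcases h5 : findRule pvR5 (c :: t) with _ | r5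
          · rfl
          · rw [pvR6, findRule_append, h5] at hfr; cases hfr
        have hSAT : ¬ (['S','A','T'] <+: c :: t) := by
          have := findRule_none_of hfr (show pvSAT ∈ pvR6 by decide)
          simpa [pvSAT] using this
        have hSATUE : ¬ (['S','A','T','U','E'] <+: c :: t) := by
          have := findRule_none_of hfr (show pvSATUE ∈ pvR6 by decide)
          simpa [pvSATUE] using this
        have hSATHU : ¬ (['S','A','T','H','U'] <+: c :: t) := by
          have := findRule_none_of hfr (show pvSATHU ∈ pvR6 by decide)
          simpa [pvSATHU] using this
        have hnotop : ¬ (['S','A','T'] <+: c :: mscan pvR5 t) := by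
          intro hp
          obtain ⟨hc, hp2⟩ := List.cons_prefix_cons.1 hp
          rcases pair_prefix (R := pvR5) (Y := 'A') (Z := 'T') (by decide) hp2 with
            hL | ⟨r, hm, hhead, hpre⟩
          · exact hSAT (List.cons_prefix_cons.2 ⟨hc, hL⟩)
          · have hmem : r = pvTUE ∨ r = pvTHU := by
              simp only [pvR5, pvR4, pvR3, pvR2, pvR1, List.mem_append, List.mem_singleton,
                List.mem_cons, List.not_mem_nil, or_false, or_assoc] at hm
              rcases hm with rfl | rfl | rfl | rfl | rfl
              · exact absurd hhead (by decide)
              · exact Or.inl rfl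
              · exact absurd hhead (by decide)
              · exact Or.inr rfl
              · exact absurd hhead (by decide)
            rcases hmem with rfl | rfl
            · exact hSATUE (List.cons_prefix_cons.2 ⟨hc, by simpa [pvTUE] using hpre⟩)
            · exact hSATHU (List.cons_prefix_cons.2 ⟨hc, by simpa [pvTHU] using hpre⟩)
        have hnone2 : findRule [pvSAT] (c :: mscan pvR5 t) = none := by
          rw [findRule, if_neg]
          · rfl
          · intro hb
            exact hnotop (by simpa [pvSAT] using (List.isPrefixOf_iff_prefix).1 hb)
        rw [mscan_cons_none hfrR, mscan_cons_none hnone2,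
            ih t (by simp only [List.length_cons] at hl; omega), mscan_cons_none hfr]
      · rw [pvR6, findRule_append] at hfr
        rcases h5 : findRule pvR5 (c :: t) with _ | r5
        · rw [h5] at hfr
          -- one of the three appended rules matched
          by_cases hue : pvSATUE.1.isPrefixOf (c :: t)
          · rw [findRule, if_pos hue] at hfr
            injection hfr with hfr'
            obtain ⟨rest, hrest0⟩ := (List.isPrefixOf_iff_prefix).1 hue
            have hrest : 'S' :: 'A' :: 'T' :: 'U' :: 'E' :: rest = c :: t := hrest0
            injection hrest with hc hrest
            subst hc; subst hrest
            have e1 : findRule pvR5 ('S'::'A'::'T'::'U'::'E'::rest) = none := by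
              simp [findRule, pvR5, pvR4, pvR3, pvR2, pvR1, pvMON, pvTUE, pvWED, pvTHU, pvFRI,
                List.isPrefixOf]
            have e2 : findRule pvR5 ('A'::'T'::'U'::'E'::rest) = none := by
              simp [findRule, pvR5, pvR4, pvR3, pvR2, pvR1, pvMON, pvTUE, pvWED, pvTHU, pvFRI,
                List.isPrefixOf]
            have e3 : findRule pvR5 ('T'::'U'::'E'::rest) = some pvTUE := by
              simp [findRule, pvR5, pvR4, pvR3, pvR2, pvR1, pvMON, pvTUE, pvWED, pvTHU, pvFRI,
                List.isPrefixOf]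
            rw [mscan_cons_none e1, mscan_cons_none e2, mscan_cons_some e3,
                show (pvTUE.2 : List Char) = ['T','u'] from rfl,
                show List.drop (pvTUE.1.length - 1) ('U'::'E'::rest) = rest from rfl]
            simp only [List.cons_append, List.nil_append]
            have f1 : findRule [pvSAT] ('S'::'A'::'T'::'u'::mscan pvR5 rest) = some pvSAT := by
              simp [findRule, pvSAT, List.isPrefixOf]
            rw [mscan_cons_some f1,
                show (pvSAT.2 : List Char) = ['S','a'] from rfl,
                show List.drop (pvSAT.1.length - 1) ('A'::'T'::'u'::mscan pvR5 rest) =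
                  'u' :: mscan pvR5 rest from rfl]
            simp only [List.cons_append, List.nil_append]
            have f2 : findRule [pvSAT] ('u' :: mscan pvR5 rest) = none := by
              simp [findRule, pvSAT, List.isPrefixOf]
            rw [mscan_cons_none f2]
            rw [ih rest (by simp only [List.length_cons] at hl; omega)]
            have g1 : findRule pvR6 ('S'::'A'::'T'::'U'::'E'::rest) = some pvSATUE := by
              simp [findRule, pvR6, pvR5, pvR4, pvR3, pvR2, pvR1, pvMON, pvTUE, pvWED, pvTHU,
                pvFRI, pvSATUE, List.isPrefixOf]
            rw [mscan_cons_some g1,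
                show (pvSATUE.2 : List Char) = ['S','a','u'] from rfl,
                show List.drop (pvSATUE.1.length - 1) ('A'::'T'::'U'::'E'::rest) = rest from rfl]
            simp
          · by_cases hhu : pvSATHU.1.isPrefixOf (c :: t)
            · rw [findRule, if_neg hue, findRule, if_pos hhu] at hfr
              injection hfr with hfr'
              obtain ⟨rest, hrest0⟩ := (List.isPrefixOf_iff_prefix).1 hhu
              have hrest : 'S' :: 'A' :: 'T' :: 'H' :: 'U' :: rest = c :: t := hrest0
              injection hrest with hc hrest
              subst hc; subst hrest
              have e1 : findRule pvR5 ('S'::'A'::'T'::'H'::'U'::rest) = none := by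
                simp [findRule, pvR5, pvR4, pvR3, pvR2, pvR1, pvMON, pvTUE, pvWED, pvTHU, pvFRI,
                  List.isPrefixOf]
              have e2 : findRule pvR5 ('A'::'T'::'H'::'U'::rest) = none := by
                simp [findRule, pvR5, pvR4, pvR3, pvR2, pvR1, pvMON, pvTUE, pvWED, pvTHU, pvFRI,
                  List.isPrefixOf]
              have e3 : findRule pvR5 ('T'::'H'::'U'::rest) = some pvTHU := by
                simp [findRule, pvR5, pvR4, pvR3, pvR2, pvR1, pvMON, pvTUE, pvWED, pvTHU, pvFRI,
                  List.isPrefixOf]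
              rw [mscan_cons_none e1, mscan_cons_none e2, mscan_cons_some e3,
                  show (pvTHU.2 : List Char) = ['T','h'] from rfl,
                  show List.drop (pvTHU.1.length - 1) ('H'::'U'::rest) = rest from rfl]
              simp only [List.cons_append, List.nil_append]
              have f1 : findRule [pvSAT] ('S'::'A'::'T'::'h'::mscan pvR5 rest) = some pvSAT := by
                simp [findRule, pvSAT, List.isPrefixOf]
              rw [mscan_cons_some f1,
                  show (pvSAT.2 : List Char) = ['S','a'] from rfl,
                  show List.drop (pvSAT.1.length - 1) ('A'::'T'::'h'::mscan pvR5 rest) =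
                    'h' :: mscan pvR5 rest from rfl]
              simp only [List.cons_append, List.nil_append]
              have f2 : findRule [pvSAT] ('h' :: mscan pvR5 rest) = none := by
                simp [findRule, pvSAT, List.isPrefixOf]
              rw [mscan_cons_none f2]
              rw [ih rest (by simp only [List.length_cons] at hl; omega)]
              have g1 : findRule pvR6 ('S'::'A'::'T'::'H'::'U'::rest) = some pvSATHU := by
                simp [findRule, pvR6, pvR5, pvR4, pvR3, pvR2, pvR1, pvMON, pvTUE, pvWED, pvTHU,
                  pvFRI, pvSATUE, pvSATHU, List.isPrefixOf, hue]
              rw [mscan_cons_some g1,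
                  show (pvSATHU.2 : List Char) = ['S','a','h'] from rfl,
                  show List.drop (pvSATHU.1.length - 1) ('A'::'T'::'H'::'U'::rest) = rest from rfl]
              simp
            · by_cases hsa : pvSAT.1.isPrefixOf (c :: t)
              · rw [findRule, if_neg hue, findRule, if_neg hhu, findRule, if_pos hsa] at hfr
                injection hfr with hfr'
                obtain ⟨rest, hrest0⟩ := (List.isPrefixOf_iff_prefix).1 hsa
                have hrest : 'S' :: 'A' :: 'T' :: rest = c :: t := hrest0
                injection hrest with hc hrest
                subst hc; subst hrest
                have hue' : List.isPrefixOf ['U','E'] rest = false := by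
                  by_contra hx
                  simp only [Bool.not_eq_false] at hx
                  exact hue (by simp [pvSATUE, List.isPrefixOf, hx])
                have hhu' : List.isPrefixOf ['H','U'] rest = false := by
                  by_contra hx
                  simp only [Bool.not_eq_false] at hx
                  exact hhu (by simp [pvSATHU, List.isPrefixOf, hx])
                have e1 : findRule pvR5 ('S'::'A'::'T'::rest) = none := by
                  simp [findRule, pvR5, pvR4, pvR3, pvR2, pvR1, pvMON, pvTUE, pvWED, pvTHU,
                    pvFRI, List.isPrefixOf]
                have e2 : findRule pvR5 ('A'::'T'::rest) = none := by
                  simp [findRule, pvR5, pvR4, pvR3, pvR2, pvR1, pvMON, pvTUE, pvWED, pvTHU,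
                    pvFRI, List.isPrefixOf]
                have e3 : findRule pvR5 ('T'::rest) = none := by
                  simp [findRule, pvR5, pvR4, pvR3, pvR2, pvR1, pvMON, pvTUE, pvWED, pvTHU,
                    pvFRI, List.isPrefixOf, hue', hhu']
                rw [mscan_cons_none e1, mscan_cons_none e2, mscan_cons_none e3]
                have f1 : findRule [pvSAT] ('S'::'A'::'T'::mscan pvR5 rest) = some pvSAT := by
                  simp [findRule, pvSAT, List.isPrefixOf]
                rw [mscan_cons_some f1,
                    show (pvSAT.2 : List Char) = ['S','a'] from rfl,
                    show List.drop (pvSAT.1.length - 1) ('A'::'T'::mscan pvR5 rest) =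
                      mscan pvR5 rest from rfl]
                simp only [List.cons_append, List.nil_append]
                rw [ih rest (by simp only [List.length_cons] at hl; omega)]
                have g1 : findRule pvR6 ('S'::'A'::'T'::rest) = some pvSAT := by
                  rw [pvR6, findRule_append, e1, findRule, if_neg (by simpa using hue),
                      findRule, if_neg (by simpa using hhu), findRule, if_pos (by simpa using hsa)]
                rw [mscan_cons_some g1,
                    show (pvSAT.2 : List Char) = ['S','a'] from rfl,
                    show List.drop (pvSAT.1.length - 1) ('A'::'T'::rest) = rest from rfl]
                simp
              · rw [findRule, if_neg hue, findRule, if_neg hhu, findRule, if_neg hsa,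
                    findRule] at hfr
                cases hfr
        · -- an old pvR5 rule matched
          have he : r5 = r := by
            rw [h5] at hfr
            injection hfr
          obtain ⟨hm, _⟩ := findRule_mem h5
          have hfr6 : findRule pvR6 (c :: t) = some r5 := by
            rw [pvR6, findRule_append, h5, he]
          rw [mscan_cons_some h5, hp5 r5 hm,
              ih (t.drop (r5.1.length - 1)) (by simp only [List.length_drop, List.length_cons] at hl ⊢; omega),
              mscan_cons_some hfr6]

theorem step2 : ∀ l, mscan [pvTUE] (mscan [pvMON] l) = mscan pvR2 l := by
  have h := step_generic pvR1 'T' 'U' 'E' ['T','u'] (by decide)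
    (by intro r hr m
        simp only [pvR1, List.mem_singleton] at hr
        subst hr
        exact push2 _ _ _ _ (by simp [findRule, List.isPrefixOf])
          (by simp [findRule, List.isPrefixOf]))
    (by intro m
        exact push3 _ _ _ _ _ (by simp [findRule, pvR1, pvMON, List.isPrefixOf])
          (by simp [findRule, pvR1, pvMON, List.isPrefixOf])
          (by simp [findRule, pvR1, pvMON, List.isPrefixOf]))
  intro l
  simpa only [pvR1, pvR2, pvTUE] using h l

theorem step3 : ∀ l, mscan [pvWED] (mscan pvR2 l) = mscan pvR3 l := by
  have h := step_generic pvR2 'W' 'E' 'D' ['W','e'] (by decide)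
    (by intro r hr m
        simp only [pvR2, pvR1, List.mem_append, List.mem_singleton, List.mem_cons,
          List.not_mem_nil, or_false, or_assoc] at hr
        rcases hr with rfl | rfl <;>
          exact push2 _ _ _ _ (by simp [findRule, pvMON, pvTUE, List.isPrefixOf])
            (by simp [findRule, pvMON, pvTUE, List.isPrefixOf]))
    (by intro m
        exact push3 _ _ _ _ _ (by simp [findRule, pvR2, pvR1, pvMON, pvTUE, List.isPrefixOf])
          (by simp [findRule, pvR2, pvR1, pvMON, pvTUE, List.isPrefixOf])
          (by simp [findRule, pvR2, pvR1, pvMON, pvTUE, List.isPrefixOf]))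
  intro l
  simpa only [pvR3, pvWED] using h l

theorem step4 : ∀ l, mscan [pvTHU] (mscan pvR3 l) = mscan pvR4 l := by
  have h := step_generic pvR3 'T' 'H' 'U' ['T','h'] (by decide)
    (by intro r hr m
        simp only [pvR3, pvR2, pvR1, List.mem_append, List.mem_singleton, List.mem_cons,
          List.not_mem_nil, or_false, or_assoc] at hr
        rcases hr with rfl | rfl | rfl <;>
          exact push2 _ _ _ _ (by simp [findRule, pvMON, pvTUE, pvWED, List.isPrefixOf])
            (by simp [findRule, pvMON, pvTUE, pvWED, List.isPrefixOf]))
    (by intro m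
        exact push3 _ _ _ _ _
          (by simp [findRule, pvR3, pvR2, pvR1, pvMON, pvTUE, pvWED, List.isPrefixOf])
          (by simp [findRule, pvR3, pvR2, pvR1, pvMON, pvTUE, pvWED, List.isPrefixOf])
          (by simp [findRule, pvR3, pvR2, pvR1, pvMON, pvTUE, pvWED, List.isPrefixOf]))
  intro l
  simpa only [pvR4, pvTHU] using h l

theorem step5 : ∀ l, mscan [pvFRI] (mscan pvR4 l) = mscan pvR5 l := by
  have h := step_generic pvR4 'F' 'R' 'I' ['F','r'] (by decide)
    (by intro r hr m
        simp only [pvR4, pvR3, pvR2, pvR1, List.mem_append, List.mem_singleton, List.mem_cons,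
          List.not_mem_nil, or_false, or_assoc] at hr
        rcases hr with rfl | rfl | rfl | rfl <;>
          exact push2 _ _ _ _ (by simp [findRule, pvMON, pvTUE, pvWED, pvTHU, List.isPrefixOf])
            (by simp [findRule, pvMON, pvTUE, pvWED, pvTHU, List.isPrefixOf]))
    (by intro m
        exact push3 _ _ _ _ _
          (by simp [findRule, pvR4, pvR3, pvR2, pvR1, pvMON, pvTUE, pvWED, pvTHU, List.isPrefixOf])
          (by simp [findRule, pvR4, pvR3, pvR2, pvR1, pvMON, pvTUE, pvWED, pvTHU, List.isPrefixOf])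
          (by simp [findRule, pvR4, pvR3, pvR2, pvR1, pvMON, pvTUE, pvWED, pvTHU, List.isPrefixOf]))
  intro l
  simpa only [pvR5, pvFRI] using h l

theorem step7 : ∀ l, mscan [pvSUN] (mscan pvR6 l) = mscan pvR7 l := by
  have h := step_generic pvR6 'S' 'U' 'N' ['S','u'] (by decide)
    (by intro r hr m
        simp only [pvR6, pvR5, pvR4, pvR3, pvR2, pvR1, List.mem_append, List.mem_singleton,
          List.mem_cons, List.not_mem_nil, or_false, or_assoc] at hr
        rcases hr with rfl | rfl | rfl | rfl | rfl | rfl | rfl | rfl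
        · exact push2 _ _ _ _ (by simp [findRule, pvMON, List.isPrefixOf])
            (by simp [findRule, pvMON, List.isPrefixOf])
        · exact push2 _ _ _ _ (by simp [findRule, pvTUE, List.isPrefixOf])
            (by simp [findRule, pvTUE, List.isPrefixOf])
        · exact push2 _ _ _ _ (by simp [findRule, pvWED, List.isPrefixOf])
            (by simp [findRule, pvWED, List.isPrefixOf])
        · exact push2 _ _ _ _ (by simp [findRule, pvTHU, List.isPrefixOf])
            (by simp [findRule, pvTHU, List.isPrefixOf])
        · exact push2 _ _ _ _ (by simp [findRule, pvFRI, List.isPrefixOf])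
            (by simp [findRule, pvFRI, List.isPrefixOf])
        · exact push3 _ _ _ _ _ (by simp [findRule, pvSATUE, List.isPrefixOf])
            (by simp [findRule, pvSATUE, List.isPrefixOf])
            (by simp [findRule, pvSATUE, List.isPrefixOf])
        · exact push3 _ _ _ _ _ (by simp [findRule, pvSATHU, List.isPrefixOf])
            (by simp [findRule, pvSATHU, List.isPrefixOf])
            (by simp [findRule, pvSATHU, List.isPrefixOf])
        · exact push2 _ _ _ _ (by simp [findRule, pvSAT, List.isPrefixOf])
            (by simp [findRule, pvSAT, List.isPrefixOf]))
    (by intro m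
        exact push3 _ _ _ _ _
          (by simp [findRule, pvR6, pvR5, pvR4, pvR3, pvR2, pvR1, pvMON, pvTUE, pvWED, pvTHU,
            pvFRI, pvSAT, pvSATUE, pvSATHU, List.isPrefixOf])
          (by simp [findRule, pvR6, pvR5, pvR4, pvR3, pvR2, pvR1, pvMON, pvTUE, pvWED, pvTHU,
            pvFRI, pvSAT, pvSATUE, pvSATHU, List.isPrefixOf])
          (by simp [findRule, pvR6, pvR5, pvR4, pvR3, pvR2, pvR1, pvMON, pvTUE, pvWED, pvTHU,
            pvFRI, pvSAT, pvSATUE, pvSATHU, List.isPrefixOf]))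
  intro l
  simpa only [pvR7, pvSUN] using h l

theorem chainA : ∀ l : List Char,
    mscan [pvSUN] (mscan [pvSAT] (mscan [pvFRI] (mscan [pvTHU]
      (mscan [pvWED] (mscan [pvTUE] (mscan [pvMON] l)))))) = mscan pvR7 l := by
  intro l
  rw [step2 l, step3 l, step4 l, step5 l, step6 _, step7 _]

theorem go_eq_mscan (old new : List Char) (hold : old ≠ []) :
    ∀ (fuel : Nat) (l acc : List Char), l.length ≤ fuel →
      PySem.Chars.replace.go old new fuel l acc = acc.reverse ++ mscan [(old, new)] l := by
  intro fuel
  induction fuel with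
  | zero =>
    intro l acc hl
    have hnil : l = [] := List.eq_nil_of_length_eq_zero (Nat.le_zero.1 hl)
    subst hnil
    rw [PySem.Chars.replace.go]
    simp [mscan_nil]
  | succ n ih =>
    intro l acc hl
    cases l with
    | nil =>
      rw [PySem.Chars.replace.go]
      · simp [mscan_nil]
      · omega
    | cons c t =>
      rw [PySem.Chars.replace.go]
      by_cases hp : old.isPrefixOf (c :: t)
      · rw [if_pos hp]
        obtain ⟨k, hk⟩ : ∃ k, old.length = k + 1 := by
          cases hx : old with
          | nil => exact absurd hx hold
          | cons a as => exact ⟨as.length, by simp⟩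
        have hdrop : List.drop old.length (c :: t) = List.drop (old.length - 1) t := by
          rw [hk]
          simp
        have hlen : (List.drop old.length (c :: t)).length ≤ n := by
          simp only [List.length_drop, List.length_cons] at *
          omega
        rw [ih _ _ hlen]
        have hfr : findRule [(old, new)] (c :: t) = some (old, new) := by
          rw [findRule, if_pos hp]
        rw [mscan_cons_some hfr, hdrop]
        simp
      · rw [if_neg hp]
        rw [ih t (c :: acc) (by simp only [List.length_cons] at hl; omega)]
        have hfr : findRule [(old, new)] (c :: t) = none := by
          rw [findRule, if_neg]
          · rfl
          · simpa using hp
        rw [mscan_cons_none hfr]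
        simp

theorem replace_eq_mscan (old new : List Char) (hold : old ≠ []) (s : List Char) :
    PySem.Chars.replace s old new = mscan [(old, new)] s := by
  rw [PySem.Chars.replace]
  rw [if_neg (by simpa using hold)]
  rw [go_eq_mscan old new hold s.length s [] le_rfl]
  simp

theorem normA (s : String) : (normalize_dayrange s).toList = mscan pvR7 s.toList := by
  have e : ∀ (x o nw : String), o.toList ≠ [] →
      (PySem.Str.replace x o nw).toList = mscan [(o.toList, nw.toList)] x.toList := by
    intro x o nw h
    rw [PySem.Str.replace, String.toList_ofList]
    exact replace_eq_mscan _ _ h _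
  simp only [normalize_dayrange, List.foldl_cons, List.foldl_nil]
  rw [e _ "SUN" "Su" (by decide), e _ "SAT" "Sa" (by decide), e _ "FRI" "Fr" (by decide),
      e _ "THU" "Th" (by decide), e _ "WED" "We" (by decide), e _ "TUE" "Tu" (by decide),
      e _ "MON" "Mo" (by decide)]
  rw [show ("MON".toList, "Mo".toList) = pvMON by decide,
      show ("TUE".toList, "Tu".toList) = pvTUE by decide,
      show ("WED".toList, "We".toList) = pvWED by decide,
      show ("THU".toList, "Th".toList) = pvTHU by decide,
      show ("FRI".toList, "Fr".toList) = pvFRI by decide,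
      show ("SAT".toList, "Sa".toList) = pvSAT by decide,
      show ("SUN".toList, "Su".toList) = pvSUN by decide]
  exact chainA s.toList

theorem lookup_dayMap_mem {k v : String} (h : List.lookup k pvDayMap = some v) :
    k = "MON" ∨ k = "TUE" ∨ k = "WED" ∨ k = "THU" ∨ k = "FRI" ∨ k = "SAT" ∨ k = "SUN" := by
  simp only [pvDayMap, List.lookup] at h
  repeat' split at h
  all_goals simp_all

theorem findRule_none_lookup {c : Char} {t : List Char}
    (hfr : findRule pvR7 (c :: t) = none) :
    List.lookup (String.ofList (List.take 3 (c :: t))) pvDayMap = none := by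
  rcases hlk : List.lookup (String.ofList (List.take 3 (c :: t))) pvDayMap with _ | v
  · rfl
  · exfalso
    have hx : ∀ (key : String) (pat : List Char) (rl : List Char × List Char),
        rl ∈ pvR7 → rl.1 = pat → key.toList = pat →
        String.ofList (List.take 3 (c :: t)) = key → False := by
      intro key pat rl hmem hpat hkey hofl
      have htake : List.take 3 (c :: t) = pat := by
        have := congrArg String.toList hofl
        rwa [String.toList_ofList, hkey] at this
      have hpre : pat <+: c :: t := htake ▸ List.take_prefix 3 (c :: t)
      exact findRule_none_of hfr hmem (hpat ▸ hpre)
    rcases lookup_dayMap_mem hlk with hk | hk | hk | hk | hk | hk | hk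
    · exact hx "MON" ['M','O','N'] pvMON (by decide) rfl (by decide) hk
    · exact hx "TUE" ['T','U','E'] pvTUE (by decide) rfl (by decide) hk
    · exact hx "WED" ['W','E','D'] pvWED (by decide) rfl (by decide) hk
    · exact hx "THU" ['T','H','U'] pvTHU (by decide) rfl (by decide) hk
    · exact hx "FRI" ['F','R','I'] pvFRI (by decide) rfl (by decide) hk
    · exact hx "SAT" ['S','A','T'] pvSAT (by decide) rfl (by decide) hk
    · exact hx "SUN" ['S','U','N'] pvSUN (by decide) rfl (by decide) hk

-- the 3-char window at a position whose first char starts no key looks up to nothing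
theorem lookup_head_none {d : Char} (m : List Char)
    (hM : d ≠ 'M') (hT : d ≠ 'T') (hW : d ≠ 'W') (hF : d ≠ 'F') (hS : d ≠ 'S') :
    List.lookup (String.ofList (List.take 3 (d :: m))) pvDayMap = none := by
  rcases hlk : List.lookup (String.ofList (List.take 3 (d :: m))) pvDayMap with _ | v
  · rfl
  · exfalso
    have hx : ∀ (key : String) (x : Char) (p : List Char), key.toList = x :: p → d ≠ x →
        String.ofList (List.take 3 (d :: m)) = key → False := by
      intro key x p hkey hne hofl
      have := congrArg String.toList hofl
      rw [String.toList_ofList, hkey] at this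
      have h2 : d :: List.take 2 m = x :: p := this
      injection h2 with h3 _
      exact hne h3
    rcases lookup_dayMap_mem hlk with hk | hk | hk | hk | hk | hk | hk
    · exact hx "MON" 'M' ['O','N'] (by decide) hM hk
    · exact hx "TUE" 'T' ['U','E'] (by decide) hT hk
    · exact hx "WED" 'W' ['E','D'] (by decide) hW hk
    · exact hx "THU" 'T' ['H','U'] (by decide) hT hk
    · exact hx "FRI" 'F' ['R','I'] (by decide) hF hk
    · exact hx "SAT" 'S' ['A','T'] (by decide) hS hk
    · exact hx "SUN" 'S' ['U','N'] (by decide) hS hk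

theorem infix_cons3 {x : Char} {p : List Char} {a b c : Char} {rest : List Char}
    (h : (x :: p) <:+: a :: b :: c :: rest) (h0 : ¬ ((x :: p) <+: a :: b :: c :: rest))
    (hb : x ≠ b) (hc : x ≠ c) : (x :: p) <:+: rest := by
  rcases List.infix_cons_iff.1 h with h1 | h2
  · exact absurd h1 h0
  rcases List.infix_cons_iff.1 h2 with h1 | h3
  · exact absurd (List.cons_prefix_cons.1 h1).1 hb
  rcases List.infix_cons_iff.1 h3 with h1 | h4
  · exact absurd (List.cons_prefix_cons.1 h1).1 hc
  exact h4

theorem altGo_eq : ∀ (n : Nat) (l : List Char), l.length ≤ n →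
    ¬ (['S','A','T','U','E'] <:+: l) → ¬ (['S','A','T','H','U'] <:+: l) →
    pvAltGo l = mscan pvR7 l := by
  intro n
  induction n with
  | zero =>
    intro l hl _ _
    have hnil : l = [] := List.eq_nil_of_length_eq_zero (Nat.le_zero.1 hl)
    subst hnil
    rw [pvAltGo, mscan_nil]
  | succ n ih =>
    intro l hl hue hhu
    cases l with
    | nil => rw [pvAltGo, mscan_nil]
    | cons c t =>
      rcases hfr : findRule pvR7 (c :: t) with _ | r
      · -- no rule matches, so the 3-char window is not a key of the map
        have hnone := findRule_none_lookup hfr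
        rw [pvAltGo, hnone]
        show c :: pvAltGo t = _
        rw [ih t (by simp only [List.length_cons] at hl; omega)
              (fun h => hue (h.trans (List.IsSuffix.isInfix ⟨[c], rfl⟩)))
              (fun h => hhu (h.trans (List.IsSuffix.isInfix ⟨[c], rfl⟩))),
            mscan_cons_none hfr]
      · obtain ⟨hm, hp⟩ := findRule_mem hfr
        simp only [pvR7, pvR6, pvR5, pvR4, pvR3, pvR2, pvR1, List.mem_append, List.mem_cons,
          List.mem_singleton, List.not_mem_nil, or_false, or_assoc] at hm
        rcases hm with rfl | rfl | rfl | rfl | rfl | rfl | rfl | rfl | rfl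
        · -- MON
          obtain ⟨rest, h0⟩ := hp
          have hrest : 'M' :: 'O' :: 'N' :: rest = c :: t := h0
          injection hrest with hc hrest
          subst hc; subst hrest
          have hlk : List.lookup (String.ofList (List.take 3 ('M'::'O'::'N'::rest))) pvDayMap
              = some "Mo" := by
            rw [show List.take 3 ('M'::'O'::'N'::rest) = ['M','O','N'] from rfl]
            decide
          rw [pvAltGo, hlk]
          show "Mo".toList ++ pvAltGo (List.drop 2 ('O'::'N'::rest)) = _
          rw [show ("Mo".toList : List Char) = ['M','o'] by decide,
              show List.drop 2 ('O'::'N'::rest) = rest from rfl,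
              ih rest (by simp only [List.length_cons] at hl; omega)
                (fun h => hue (h.trans (List.IsSuffix.isInfix ⟨['M','O','N'], rfl⟩)))
                (fun h => hhu (h.trans (List.IsSuffix.isInfix ⟨['M','O','N'], rfl⟩))),
              mscan_cons_some hfr,
              show (pvMON.2 : List Char) = ['M','o'] from rfl,
              show List.drop (pvMON.1.length - 1) ('O'::'N'::rest) = rest from rfl]
        · -- TUE
          obtain ⟨rest, h0⟩ := hp
          have hrest : 'T' :: 'U' :: 'E' :: rest = c :: t := h0
          injection hrest with hc hrest
          subst hc; subst hrest
          have hlk : List.lookup (String.ofList (List.take 3 ('T'::'U'::'E'::rest))) pvDayMap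
              = some "Tu" := by
            rw [show List.take 3 ('T'::'U'::'E'::rest) = ['T','U','E'] from rfl]
            decide
          rw [pvAltGo, hlk]
          show "Tu".toList ++ pvAltGo (List.drop 2 ('U'::'E'::rest)) = _
          rw [show ("Tu".toList : List Char) = ['T','u'] by decide,
              show List.drop 2 ('U'::'E'::rest) = rest from rfl,
              ih rest (by simp only [List.length_cons] at hl; omega)
                (fun h => hue (h.trans (List.IsSuffix.isInfix ⟨['T','U','E'], rfl⟩)))
                (fun h => hhu (h.trans (List.IsSuffix.isInfix ⟨['T','U','E'], rfl⟩))),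
              mscan_cons_some hfr,
              show (pvTUE.2 : List Char) = ['T','u'] from rfl,
              show List.drop (pvTUE.1.length - 1) ('U'::'E'::rest) = rest from rfl]
        · -- WED
          obtain ⟨rest, h0⟩ := hp
          have hrest : 'W' :: 'E' :: 'D' :: rest = c :: t := h0
          injection hrest with hc hrest
          subst hc; subst hrest
          have hlk : List.lookup (String.ofList (List.take 3 ('W'::'E'::'D'::rest))) pvDayMap
              = some "We" := by
            rw [show List.take 3 ('W'::'E'::'D'::rest) = ['W','E','D'] from rfl]
            decide
          rw [pvAltGo, hlk]
          show "We".toList ++ pvAltGo (List.drop 2 ('E'::'D'::rest)) = _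
          rw [show ("We".toList : List Char) = ['W','e'] by decide,
              show List.drop 2 ('E'::'D'::rest) = rest from rfl,
              ih rest (by simp only [List.length_cons] at hl; omega)
                (fun h => hue (h.trans (List.IsSuffix.isInfix ⟨['W','E','D'], rfl⟩)))
                (fun h => hhu (h.trans (List.IsSuffix.isInfix ⟨['W','E','D'], rfl⟩))),
              mscan_cons_some hfr,
              show (pvWED.2 : List Char) = ['W','e'] from rfl,
              show List.drop (pvWED.1.length - 1) ('E'::'D'::rest) = rest from rfl]
        · -- THU
          obtain ⟨rest, h0⟩ := hp
          have hrest : 'T' :: 'H' :: 'U' :: rest = c :: t := h0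
          injection hrest with hc hrest
          subst hc; subst hrest
          have hlk : List.lookup (String.ofList (List.take 3 ('T'::'H'::'U'::rest))) pvDayMap
              = some "Th" := by
            rw [show List.take 3 ('T'::'H'::'U'::rest) = ['T','H','U'] from rfl]
            decide
          rw [pvAltGo, hlk]
          show "Th".toList ++ pvAltGo (List.drop 2 ('H'::'U'::rest)) = _
          rw [show ("Th".toList : List Char) = ['T','h'] by decide,
              show List.drop 2 ('H'::'U'::rest) = rest from rfl,
              ih rest (by simp only [List.length_cons] at hl; omega)
                (fun h => hue (h.trans (List.IsSuffix.isInfix ⟨['T','H','U'], rfl⟩)))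
                (fun h => hhu (h.trans (List.IsSuffix.isInfix ⟨['T','H','U'], rfl⟩))),
              mscan_cons_some hfr,
              show (pvTHU.2 : List Char) = ['T','h'] from rfl,
              show List.drop (pvTHU.1.length - 1) ('H'::'U'::rest) = rest from rfl]
        · -- FRI
          obtain ⟨rest, h0⟩ := hp
          have hrest : 'F' :: 'R' :: 'I' :: rest = c :: t := h0
          injection hrest with hc hrest
          subst hc; subst hrest
          have hlk : List.lookup (String.ofList (List.take 3 ('F'::'R'::'I'::rest))) pvDayMap
              = some "Fr" := by
            rw [show List.take 3 ('F'::'R'::'I'::rest) = ['F','R','I'] from rfl]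
            decide
          rw [pvAltGo, hlk]
          show "Fr".toList ++ pvAltGo (List.drop 2 ('R'::'I'::rest)) = _
          rw [show ("Fr".toList : List Char) = ['F','r'] by decide,
              show List.drop 2 ('R'::'I'::rest) = rest from rfl,
              ih rest (by simp only [List.length_cons] at hl; omega)
                (fun h => hue (h.trans (List.IsSuffix.isInfix ⟨['F','R','I'], rfl⟩)))
                (fun h => hhu (h.trans (List.IsSuffix.isInfix ⟨['F','R','I'], rfl⟩))),
              mscan_cons_some hfr,
              show (pvFRI.2 : List Char) = ['F','r'] from rfl,
              show List.drop (pvFRI.1.length - 1) ('R'::'I'::rest) = rest from rfl]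
        · -- SATUE: excluded by the no-"SATUE" assumption
          exact absurd (List.IsPrefix.isInfix (by simpa [pvSATUE] using hp)) hue
        · -- SATHU: excluded by the no-"SATHU" assumption
          exact absurd (List.IsPrefix.isInfix (by simpa [pvSATHU] using hp)) hhu
        · -- SAT
          obtain ⟨rest, h0⟩ := hp
          have hrest : 'S' :: 'A' :: 'T' :: rest = c :: t := h0
          injection hrest with hc hrest
          subst hc; subst hrest
          have hlk : List.lookup (String.ofList (List.take 3 ('S'::'A'::'T'::rest))) pvDayMap
              = some "Sa" := by
            rw [show List.take 3 ('S'::'A'::'T'::rest) = ['S','A','T'] from rfl]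
            decide
          rw [pvAltGo, hlk]
          show "Sa".toList ++ pvAltGo (List.drop 2 ('A'::'T'::rest)) = _
          rw [show ("Sa".toList : List Char) = ['S','a'] by decide,
              show List.drop 2 ('A'::'T'::rest) = rest from rfl,
              ih rest (by simp only [List.length_cons] at hl; omega)
                (fun h => hue (h.trans (List.IsSuffix.isInfix ⟨['S','A','T'], rfl⟩)))
                (fun h => hhu (h.trans (List.IsSuffix.isInfix ⟨['S','A','T'], rfl⟩))),
              mscan_cons_some hfr,
              show (pvSAT.2 : List Char) = ['S','a'] from rfl,
              show List.drop (pvSAT.1.length - 1) ('A'::'T'::rest) = rest from rfl]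
        · -- SUN
          obtain ⟨rest, h0⟩ := hp
          have hrest : 'S' :: 'U' :: 'N' :: rest = c :: t := h0
          injection hrest with hc hrest
          subst hc; subst hrest
          have hlk : List.lookup (String.ofList (List.take 3 ('S'::'U'::'N'::rest))) pvDayMap
              = some "Su" := by
            rw [show List.take 3 ('S'::'U'::'N'::rest) = ['S','U','N'] from rfl]
            decide
          rw [pvAltGo, hlk]
          show "Su".toList ++ pvAltGo (List.drop 2 ('U'::'N'::rest)) = _
          rw [show ("Su".toList : List Char) = ['S','u'] by decide,
              show List.drop 2 ('U'::'N'::rest) = rest from rfl,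
              ih rest (by simp only [List.length_cons] at hl; omega)
                (fun h => hue (h.trans (List.IsSuffix.isInfix ⟨['S','U','N'], rfl⟩)))
                (fun h => hhu (h.trans (List.IsSuffix.isInfix ⟨['S','U','N'], rfl⟩))),
              mscan_cons_some hfr,
              show (pvSUN.2 : List Char) = ['S','u'] from rfl,
              show List.drop (pvSUN.1.length - 1) ('U'::'N'::rest) = rest from rfl]

theorem neq_bad : ∀ (n : Nat) (l : List Char), l.length ≤ n →
    (['S','A','T','U','E'] <:+: l ∨ ['S','A','T','H','U'] <:+: l) →
    mscan pvR7 l ≠ pvAltGo l := by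
  intro n
  induction n with
  | zero =>
    intro l hl hbad _
    have hnil : l = [] := List.eq_nil_of_length_eq_zero (Nat.le_zero.1 hl)
    subst hnil
    rcases hbad with h | h <;> simpa using h
  | succ n ih =>
    intro l hl hbad
    cases l with
    | nil =>
      intro _
      rcases hbad with h | h <;> simpa using h
    | cons c t =>
      rcases hfr : findRule pvR7 (c :: t) with _ | r
      · have hnone := findRule_none_lookup hfr
        rw [mscan_cons_none hfr, pvAltGo, hnone]
        show c :: mscan pvR7 t ≠ c :: pvAltGo t
        intro heq
        injection heq with _ heq2
        refine ih t (by simp only [List.length_cons] at hl; omega) ?_ heq2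
        rcases hbad with h | h
        · rcases List.infix_cons_iff.1 h with hpre | hinf
          · exact absurd hpre
              (by simpa [pvSATUE] using findRule_none_of hfr (show pvSATUE ∈ pvR7 by decide))
          · exact Or.inl hinf
        · rcases List.infix_cons_iff.1 h with hpre | hinf
          · exact absurd hpre
              (by simpa [pvSATHU] using findRule_none_of hfr (show pvSATHU ∈ pvR7 by decide))
          · exact Or.inr hinf
      · obtain ⟨hm, hp⟩ := findRule_mem hfr
        simp only [pvR7, pvR6, pvR5, pvR4, pvR3, pvR2, pvR1, List.mem_append, List.mem_cons,
          List.not_mem_nil, or_false, or_assoc] at hm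
        rcases hm with rfl | rfl | rfl | rfl | rfl | rfl | rfl | rfl | rfl
        · -- MON
          obtain ⟨rest, h0⟩ := hp
          have hrest : 'M' :: 'O' :: 'N' :: rest = c :: t := h0
          injection hrest with hc1 hrest
          subst hc1; subst hrest
          rw [mscan_cons_some hfr,
              show (pvMON.2 : List Char) = ['M','o'] from rfl,
              show List.drop (pvMON.1.length - 1) ('O'::'N'::rest) = rest from rfl]
          have hlk : List.lookup (String.ofList (List.take 3 ('M'::'O'::'N'::rest))) pvDayMap
              = some "Mo" := by
            rw [show List.take 3 ('M'::'O'::'N'::rest) = ['M','O','N'] from rfl]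
            decide
          rw [pvAltGo, hlk]
          show _ ≠ ("Mo" : String).toList ++ pvAltGo (List.drop 2 ('O'::'N'::rest))
          rw [show (("Mo" : String).toList : List Char) = ['M','o'] by decide,
              show List.drop 2 ('O'::'N'::rest) = rest from rfl]
          simp only [List.cons_append, List.nil_append]
          intro heq
          injection heq with _ heq
          injection heq with _ heq
          refine ih rest (by simp only [List.length_cons] at hl; omega) ?_ heq
          rcases hbad with h | h
          · refine Or.inl (infix_cons3 h ?_ (by decide) (by decide))
            intro hpre
            exact absurd (List.cons_prefix_cons.1 hpre).1 (by decide)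
          · refine Or.inr (infix_cons3 h ?_ (by decide) (by decide))
            intro hpre
            exact absurd (List.cons_prefix_cons.1 hpre).1 (by decide)
        · -- TUE
          obtain ⟨rest, h0⟩ := hp
          have hrest : 'T' :: 'U' :: 'E' :: rest = c :: t := h0
          injection hrest with hc1 hrest
          subst hc1; subst hrest
          rw [mscan_cons_some hfr,
              show (pvTUE.2 : List Char) = ['T','u'] from rfl,
              show List.drop (pvTUE.1.length - 1) ('U'::'E'::rest) = rest from rfl]
          have hlk : List.lookup (String.ofList (List.take 3 ('T'::'U'::'E'::rest))) pvDayMap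
              = some "Tu" := by
            rw [show List.take 3 ('T'::'U'::'E'::rest) = ['T','U','E'] from rfl]
            decide
          rw [pvAltGo, hlk]
          show _ ≠ ("Tu" : String).toList ++ pvAltGo (List.drop 2 ('U'::'E'::rest))
          rw [show (("Tu" : String).toList : List Char) = ['T','u'] by decide,
              show List.drop 2 ('U'::'E'::rest) = rest from rfl]
          simp only [List.cons_append, List.nil_append]
          intro heq
          injection heq with _ heq
          injection heq with _ heq
          refine ih rest (by simp only [List.length_cons] at hl; omega) ?_ heq
          rcases hbad with h | h
          · refine Or.inl (infix_cons3 h ?_ (by decide) (by decide))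
            intro hpre
            exact absurd (List.cons_prefix_cons.1 hpre).1 (by decide)
          · refine Or.inr (infix_cons3 h ?_ (by decide) (by decide))
            intro hpre
            exact absurd (List.cons_prefix_cons.1 hpre).1 (by decide)
        · -- WED
          obtain ⟨rest, h0⟩ := hp
          have hrest : 'W' :: 'E' :: 'D' :: rest = c :: t := h0
          injection hrest with hc1 hrest
          subst hc1; subst hrest
          rw [mscan_cons_some hfr,
              show (pvWED.2 : List Char) = ['W','e'] from rfl,
              show List.drop (pvWED.1.length - 1) ('E'::'D'::rest) = rest from rfl]
          have hlk : List.lookup (String.ofList (List.take 3 ('W'::'E'::'D'::rest))) pvDayMap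
              = some "We" := by
            rw [show List.take 3 ('W'::'E'::'D'::rest) = ['W','E','D'] from rfl]
            decide
          rw [pvAltGo, hlk]
          show _ ≠ ("We" : String).toList ++ pvAltGo (List.drop 2 ('E'::'D'::rest))
          rw [show (("We" : String).toList : List Char) = ['W','e'] by decide,
              show List.drop 2 ('E'::'D'::rest) = rest from rfl]
          simp only [List.cons_append, List.nil_append]
          intro heq
          injection heq with _ heq
          injection heq with _ heq
          refine ih rest (by simp only [List.length_cons] at hl; omega) ?_ heq
          rcases hbad with h | h
          · refine Or.inl (infix_cons3 h ?_ (by decide) (by decide))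
            intro hpre
            exact absurd (List.cons_prefix_cons.1 hpre).1 (by decide)
          · refine Or.inr (infix_cons3 h ?_ (by decide) (by decide))
            intro hpre
            exact absurd (List.cons_prefix_cons.1 hpre).1 (by decide)
        · -- THU
          obtain ⟨rest, h0⟩ := hp
          have hrest : 'T' :: 'H' :: 'U' :: rest = c :: t := h0
          injection hrest with hc1 hrest
          subst hc1; subst hrest
          rw [mscan_cons_some hfr,
              show (pvTHU.2 : List Char) = ['T','h'] from rfl,
              show List.drop (pvTHU.1.length - 1) ('H'::'U'::rest) = rest from rfl]
          have hlk : List.lookup (String.ofList (List.take 3 ('T'::'H'::'U'::rest))) pvDayMap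
              = some "Th" := by
            rw [show List.take 3 ('T'::'H'::'U'::rest) = ['T','H','U'] from rfl]
            decide
          rw [pvAltGo, hlk]
          show _ ≠ ("Th" : String).toList ++ pvAltGo (List.drop 2 ('H'::'U'::rest))
          rw [show (("Th" : String).toList : List Char) = ['T','h'] by decide,
              show List.drop 2 ('H'::'U'::rest) = rest from rfl]
          simp only [List.cons_append, List.nil_append]
          intro heq
          injection heq with _ heq
          injection heq with _ heq
          refine ih rest (by simp only [List.length_cons] at hl; omega) ?_ heq
          rcases hbad with h | h
          · refine Or.inl (infix_cons3 h ?_ (by decide) (by decide))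
            intro hpre
            exact absurd (List.cons_prefix_cons.1 hpre).1 (by decide)
          · refine Or.inr (infix_cons3 h ?_ (by decide) (by decide))
            intro hpre
            exact absurd (List.cons_prefix_cons.1 hpre).1 (by decide)
        · -- FRI
          obtain ⟨rest, h0⟩ := hp
          have hrest : 'F' :: 'R' :: 'I' :: rest = c :: t := h0
          injection hrest with hc1 hrest
          subst hc1; subst hrest
          rw [mscan_cons_some hfr,
              show (pvFRI.2 : List Char) = ['F','r'] from rfl,
              show List.drop (pvFRI.1.length - 1) ('R'::'I'::rest) = rest from rfl]
          have hlk : List.lookup (String.ofList (List.take 3 ('F'::'R'::'I'::rest))) pvDayMap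
              = some "Fr" := by
            rw [show List.take 3 ('F'::'R'::'I'::rest) = ['F','R','I'] from rfl]
            decide
          rw [pvAltGo, hlk]
          show _ ≠ ("Fr" : String).toList ++ pvAltGo (List.drop 2 ('R'::'I'::rest))
          rw [show (("Fr" : String).toList : List Char) = ['F','r'] by decide,
              show List.drop 2 ('R'::'I'::rest) = rest from rfl]
          simp only [List.cons_append, List.nil_append]
          intro heq
          injection heq with _ heq
          injection heq with _ heq
          refine ih rest (by simp only [List.length_cons] at hl; omega) ?_ heq
          rcases hbad with h | h
          · refine Or.inl (infix_cons3 h ?_ (by decide) (by decide))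
            intro hpre
            exact absurd (List.cons_prefix_cons.1 hpre).1 (by decide)
          · refine Or.inr (infix_cons3 h ?_ (by decide) (by decide))
            intro hpre
            exact absurd (List.cons_prefix_cons.1 hpre).1 (by decide)
        · -- SATUE: the outputs differ right here ('u' vs 'U')
          obtain ⟨rest, h0⟩ := hp
          have hrest : 'S' :: 'A' :: 'T' :: 'U' :: 'E' :: rest = c :: t := h0
          injection hrest with hc1 hrest
          subst hc1; subst hrest
          rw [mscan_cons_some hfr,
              show (pvSATUE.2 : List Char) = ['S','a','u'] from rfl,
              show List.drop (pvSATUE.1.length - 1) ('A'::'T'::'U'::'E'::rest) = rest from rfl]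
          have hlk : List.lookup
              (String.ofList (List.take 3 ('S'::'A'::'T'::'U'::'E'::rest))) pvDayMap
              = some "Sa" := by
            rw [show List.take 3 ('S'::'A'::'T'::'U'::'E'::rest) = ['S','A','T'] from rfl]
            decide
          rw [pvAltGo, hlk]
          show _ ≠ ("Sa" : String).toList ++ pvAltGo (List.drop 2 ('A'::'T'::'U'::'E'::rest))
          rw [show (("Sa" : String).toList : List Char) = ['S','a'] by decide,
              show List.drop 2 ('A'::'T'::'U'::'E'::rest) = 'U'::'E'::rest from rfl]
          have hlk2 := lookup_head_none (m := 'E'::rest) (d := 'U')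
            (by decide) (by decide) (by decide) (by decide) (by decide)
          rw [pvAltGo, hlk2]
          show _ ≠ ['S','a'] ++ ('U' :: pvAltGo ('E'::rest))
          simp only [List.cons_append, List.nil_append]
          intro heq
          injection heq with _ heq
          injection heq with _ heq
          injection heq with h3 _
          exact absurd h3 (by decide)
        · -- SATHU: the outputs differ right here ('h' vs 'H')
          obtain ⟨rest, h0⟩ := hp
          have hrest : 'S' :: 'A' :: 'T' :: 'H' :: 'U' :: rest = c :: t := h0
          injection hrest with hc1 hrest
          subst hc1; subst hrest
          rw [mscan_cons_some hfr,
              show (pvSATHU.2 : List Char) = ['S','a','h'] from rfl,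
              show List.drop (pvSATHU.1.length - 1) ('A'::'T'::'H'::'U'::rest) = rest from rfl]
          have hlk : List.lookup
              (String.ofList (List.take 3 ('S'::'A'::'T'::'H'::'U'::rest))) pvDayMap
              = some "Sa" := by
            rw [show List.take 3 ('S'::'A'::'T'::'H'::'U'::rest) = ['S','A','T'] from rfl]
            decide
          rw [pvAltGo, hlk]
          show _ ≠ ("Sa" : String).toList ++ pvAltGo (List.drop 2 ('A'::'T'::'H'::'U'::rest))
          rw [show (("Sa" : String).toList : List Char) = ['S','a'] by decide,
              show List.drop 2 ('A'::'T'::'H'::'U'::rest) = 'H'::'U'::rest from rfl]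
          have hlk2 := lookup_head_none (m := 'U'::rest) (d := 'H')
            (by decide) (by decide) (by decide) (by decide) (by decide)
          rw [pvAltGo, hlk2]
          show _ ≠ ['S','a'] ++ ('H' :: pvAltGo ('U'::rest))
          simp only [List.cons_append, List.nil_append]
          intro heq
          injection heq with _ heq
          injection heq with _ heq
          injection heq with h3 _
          exact absurd h3 (by decide)
        · -- SAT
          obtain ⟨rest, h0⟩ := hp
          have hrest : 'S' :: 'A' :: 'T' :: rest = c :: t := h0
          injection hrest with hc1 hrest
          subst hc1; subst hrest
          by_cases hue2 : List.isPrefixOf ['U','E'] rest = true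
          · exfalso
            have hx : findRule pvR7 ('S'::'A'::'T'::rest) = some pvSATUE := by
              simp [findRule, pvR7, pvR6, pvR5, pvR4, pvR3, pvR2, pvR1, pvMON, pvTUE, pvWED,
                pvTHU, pvFRI, pvSATUE, List.isPrefixOf, hue2]
            rw [hfr] at hx
            exact absurd hx (by decide)
          by_cases hhu2 : List.isPrefixOf ['H','U'] rest = true
          · exfalso
            have hx : findRule pvR7 ('S'::'A'::'T'::rest) = some pvSATHU := by
              simp [findRule, pvR7, pvR6, pvR5, pvR4, pvR3, pvR2, pvR1, pvMON, pvTUE, pvWED,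
                pvTHU, pvFRI, pvSATUE, pvSATHU, List.isPrefixOf, hue2, hhu2]
            rw [hfr] at hx
            exact absurd hx (by decide)
          rw [mscan_cons_some hfr,
              show (pvSAT.2 : List Char) = ['S','a'] from rfl,
              show List.drop (pvSAT.1.length - 1) ('A'::'T'::rest) = rest from rfl]
          have hlk : List.lookup (String.ofList (List.take 3 ('S'::'A'::'T'::rest))) pvDayMap
              = some "Sa" := by
            rw [show List.take 3 ('S'::'A'::'T'::rest) = ['S','A','T'] from rfl]
            decide
          rw [pvAltGo, hlk]
          show _ ≠ ("Sa" : String).toList ++ pvAltGo (List.drop 2 ('A'::'T'::rest))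
          rw [show (("Sa" : String).toList : List Char) = ['S','a'] by decide,
              show List.drop 2 ('A'::'T'::rest) = rest from rfl]
          simp only [List.cons_append, List.nil_append]
          intro heq
          injection heq with _ heq
          injection heq with _ heq
          refine ih rest (by simp only [List.length_cons] at hl; omega) ?_ heq
          rcases hbad with h | h
          · refine Or.inl (infix_cons3 h ?_ (by decide) (by decide))
            intro hpre
            obtain ⟨_, hp1⟩ := List.cons_prefix_cons.1 hpre
            obtain ⟨_, hp2⟩ := List.cons_prefix_cons.1 hp1
            obtain ⟨_, hp3⟩ := List.cons_prefix_cons.1 hp2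
            exact hue2 ((List.isPrefixOf_iff_prefix).2 hp3)
          · refine Or.inr (infix_cons3 h ?_ (by decide) (by decide))
            intro hpre
            obtain ⟨_, hp1⟩ := List.cons_prefix_cons.1 hpre
            obtain ⟨_, hp2⟩ := List.cons_prefix_cons.1 hp1
            obtain ⟨_, hp3⟩ := List.cons_prefix_cons.1 hp2
            exact hhu2 ((List.isPrefixOf_iff_prefix).2 hp3)
        · -- SUN
          obtain ⟨rest, h0⟩ := hp
          have hrest : 'S' :: 'U' :: 'N' :: rest = c :: t := h0
          injection hrest with hc1 hrest
          subst hc1; subst hrest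
          rw [mscan_cons_some hfr,
              show (pvSUN.2 : List Char) = ['S','u'] from rfl,
              show List.drop (pvSUN.1.length - 1) ('U'::'N'::rest) = rest from rfl]
          have hlk : List.lookup (String.ofList (List.take 3 ('S'::'U'::'N'::rest))) pvDayMap
              = some "Su" := by
            rw [show List.take 3 ('S'::'U'::'N'::rest) = ['S','U','N'] from rfl]
            decide
          rw [pvAltGo, hlk]
          show _ ≠ ("Su" : String).toList ++ pvAltGo (List.drop 2 ('U'::'N'::rest))
          rw [show (("Su" : String).toList : List Char) = ['S','u'] by decide,
              show List.drop 2 ('U'::'N'::rest) = rest from rfl]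
          simp only [List.cons_append, List.nil_append]
          intro heq
          injection heq with _ heq
          injection heq with _ heq
          refine ih rest (by simp only [List.length_cons] at hl; omega) ?_ heq
          rcases hbad with h | h
          · refine Or.inl (infix_cons3 h ?_ (by decide) (by decide))
            intro hpre
            obtain ⟨_, hp1⟩ := List.cons_prefix_cons.1 hpre
            exact absurd (List.cons_prefix_cons.1 hp1).1 (by decide)
          · refine Or.inr (infix_cons3 h ?_ (by decide) (by decide))
            intro hpre
            obtain ⟨_, hp1⟩ := List.cons_prefix_cons.1 hpre
            exact absurd (List.cons_prefix_cons.1 hp1).1 (by decide)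

theorem str_eq_of_toList {a b : String} (h : a.toList = b.toList) : a = b := by
  calc a = String.ofList a.toList := by simp
    _ = String.ofList b.toList := by rw [h]
    _ = b := by simp

-- ===== VERDICT (by name: the statement is the Claim_ definition above) =====
theorem normalize_dayrange_spec : Claim_unchanged_normalize_dayrange := by
  intro s _ hD
  have h1 : ¬ (['S','A','T','U','E'] <:+: s.toList) := by
    intro h
    exact hD (Or.inl ((PySem.Str.isIn_iff_infix _ _).2 (by simpa using h)))
  have h2 : ¬ (['S','A','T','H','U'] <:+: s.toList) := by
    intro h
    exact hD (Or.inr ((PySem.Str.isIn_iff_infix _ _).2 (by simpa using h)))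
  have hB : pvAltGo s.toList = mscan pvR7 s.toList := altGo_eq s.toList.length _ le_rfl h1 h2
  apply str_eq_of_toList
  rw [normA s, normalize_dayrange_alt]
  simp [hB]

theorem normalize_dayrange_tight : Claim_exact_normalize_dayrange := by
  intro s _ hD heq
  have h := congrArg String.toList heq
  rw [normA s] at h
  have hB : (normalize_dayrange_alt s).toList = pvAltGo s.toList := by
    simp [normalize_dayrange_alt]
  rw [hB] at h
  refine neq_bad s.toList.length s.toList le_rfl ?_ h
  rcases hD with hD | hD
  · have := (PySem.Str.isIn_iff_infix _ _).1 hD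
    rw [show ("SATUE" : String).toList = ['S','A','T','U','E'] by decide] at this
    exact Or.inl this
  · have := (PySem.Str.isIn_iff_infix _ _).1 hD
    rw [show ("SATHU" : String).toList = ['S','A','T','H','U'] by decide] at this
    exact Or.inr this

theorem normalize_dayrange_changed : Claim_changed_normalize_dayrange := by
  unfold Claim_changed_normalize_dayrange
  refine ⟨by decide, by decide, str_eq_of_toList (by decide),
    str_eq_of_toList ?_, ?_⟩
  · show (normalize_dayrange_alt pvDiffWitness_normalize_dayrange).toList = _
    rw [normalize_dayrange_alt]
    simp only [String.toList_ofList]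
    rw [show pvDiffWitness_normalize_dayrange.toList = ['S','A','T','U','E'] by decide,
        show pvDiffWitnessOut_normalize_dayrange.2.toList = ['S','a','U','E'] by decide]
    have e1 : List.lookup (String.ofList (['S','A','T'] : List Char)) pvDayMap = some "Sa" := by decide
    have e2 : List.lookup (String.ofList (['U','E'] : List Char)) pvDayMap = none := by decide
    have e3 : List.lookup (String.ofList (['E'] : List Char)) pvDayMap = none := by decide
    have e4 : "Sa".toList = ['S','a'] := by decide
    simp [pvAltGo, e1, e2, e3, e4]
  intro h
  have := congrArg String.toList h
  revert this
  decide
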